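-- pv_equiv track=rewrite | github.com/Andreich2010/support-mcp | client_test.py | extract_sse_json
-- ===== SOURCE A (Python) =====
-- def extract_sse_json(raw: str):
--     """Вытаскиваем последнее data:{...} из SSE-ответа."""
--     last_json = None
--     for line in raw.splitlines():
--         line = line.strip()
--         if line.startswith("data:"):
--             candidate = line.removeprefix("data:").strip()
--             if candidate:
--                 last_json = candidate
--     return last_json
-- ===== SOURCE B (Python) =====
-- def _sse_candidate(line):
--     """Return the stripped payload of a 'data:' line, or None."""
--     line = line.strip()
--     if line.startswith("data:"):
--         candidate = line.removeprefix("data:").strip()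
--         if candidate:
--             return candidate
--     return None
--
--
-- def extract_sse_json(raw: str):
--     """Вытаскиваем последнее data:{...} из SSE-ответа."""
--     for line in reversed(raw.splitlines()):
--         candidate = _sse_candidate(line)
--         if candidate is not None:
--             return candidate
--     return None
-- ===== Notes on version B (the rewrite author's own statement) =====
-- stated objective: alternative
-- what changed: Replaces A's forward fold that keeps overwriting last_json with a backward search over reversed(splitlines()) that returns the first non-empty data: payload immediately.
import Mathlib
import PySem

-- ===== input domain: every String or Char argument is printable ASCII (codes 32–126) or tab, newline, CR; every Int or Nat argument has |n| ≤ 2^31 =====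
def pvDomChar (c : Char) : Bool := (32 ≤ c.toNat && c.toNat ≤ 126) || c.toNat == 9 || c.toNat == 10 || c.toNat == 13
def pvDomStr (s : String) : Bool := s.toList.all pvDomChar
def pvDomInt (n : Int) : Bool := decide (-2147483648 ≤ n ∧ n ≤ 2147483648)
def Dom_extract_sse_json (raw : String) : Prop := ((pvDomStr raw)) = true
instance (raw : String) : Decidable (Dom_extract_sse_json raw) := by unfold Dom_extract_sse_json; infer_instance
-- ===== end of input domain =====

-- B replaces A's forward fold that keeps overwriting `last_json` by a backward search
-- (first match from the end, early return); objective: alternative decomposition, same cost.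


-- ===== PORT A =====
-- s.removeprefix(p): exact port of Python's str.removeprefix (s[len(p):] if s.startswith(p) else s)
def pyRemoveprefix (s p : String) : String :=
  if PySem.Str.startswith s p then String.ofList (s.toList.drop p.toList.length) else s

def extract_sse_json (raw : String) : Option String :=
  (PySem.Str.splitlines raw).foldl
    (fun last_json line =>
      let line := PySem.Str.strip line
      if PySem.Str.startswith line "data:" then
        let candidate := PySem.Str.strip (pyRemoveprefix line "data:")
        if candidate.toList ≠ [] then some candidate else last_json
      else last_json)
    none

-- ===== PORT B =====
-- B's helper _sse_candidate: stripped payload of a 'data:' line, or none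
def sseCandidate? (line : String) : Option String :=
  let line := PySem.Str.strip line
  if PySem.Str.startswith line "data:" then
    let candidate := PySem.Str.strip (pyRemoveprefix line "data:")
    if candidate.toList ≠ [] then some candidate else none
  else none

def extract_sse_json_alt (raw : String) : Option String :=
  (PySem.Str.splitlines raw).reverse.findSome? sseCandidate?

-- ===== PRECONDITION & SPEC =====
def Spec_extract_sse_json (raw : String) (out : Option String) : Prop := out = extract_sse_json_alt raw
instance (raw : String) (out : Option String) : Decidable (Spec_extract_sse_json raw out) := by unfold Spec_extract_sse_json; infer_instance

-- ===== CLAIM (what is proved, stated in full; the proofs are below) =====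
def Claim_equal_extract_sse_json : Prop := ∀ (raw : String), Dom_extract_sse_json raw → Spec_extract_sse_json raw (extract_sse_json raw)

-- ===== LEMMAS AND PROOFS =====

-- A's overwrite-fold over the lines equals B's first-match search over the reversed lines,
-- with the initial accumulator as fallback.
lemma foldl_overwrite_eq_findSome_rev (ls : List String) (init : Option String) :
    ls.foldl
      (fun last_json line =>
        let line := PySem.Str.strip line
        if PySem.Str.startswith line "data:" then
          let candidate := PySem.Str.strip (pyRemoveprefix line "data:")
          if candidate.toList ≠ [] then some candidate else last_json
        else last_json)
      init
    = (ls.reverse.findSome? sseCandidate?).or init := by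
  induction ls generalizing init with
  | nil => simp
  | cons x xs ih =>
      simp only [List.foldl_cons, List.reverse_cons, List.findSome?_append, ih]
      have hx : (if PySem.Str.startswith (PySem.Str.strip x) "data:" = true then
            if (PySem.Str.strip (pyRemoveprefix (PySem.Str.strip x) "data:")).toList ≠ [] then
              some (PySem.Str.strip (pyRemoveprefix (PySem.Str.strip x) "data:"))
            else init
          else init) = (sseCandidate? x).or init := by
        simp only [sseCandidate?]
        split_ifs <;> simp
      rw [hx]
      cases xs.reverse.findSome? sseCandidate? <;> cases hc : sseCandidate? x <;>
        simp [List.findSome?, hc]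

-- ===== VERDICT (by name: the statement is the Claim_ definition above) =====
theorem extract_sse_json_spec : Claim_equal_extract_sse_json := by
  intro raw _
  unfold Spec_extract_sse_json extract_sse_json extract_sse_json_alt
  rw [foldl_overwrite_eq_findSome_rev]
  simp
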